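-- pv_equiv track=rewrite | github.com/FelipeJurisJacques/Wallet | source/libraries/monetary/forecast.py | _get_intervals
-- ===== SOURCE A (Python) =====
-- def _get_intervals(mins, maxs) -> list:
--     last = None
--     result = []
--     for max in maxs:
--         end = max
--         start = 0
--         for min in mins:
--             if max > min:
--                 start = min
--         if last == start:
--             result[len(result) - 1] = [
--                 start,
--                 end,
--             ]
--         else:
--             result.append([
--                 start,
--                 end,
--             ])
--             last = start
--     return result
-- ===== SOURCE B (Python) =====
-- def _get_intervals(mins, maxs) -> list:
--     # pass 1: suffix strict-minima stack of mins (right-to-left, strictly decreasing values)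
--     cands = []
--     for m in reversed(mins):
--         if not cands or m < cands[-1]:
--             cands.append(m)
--
--     def start_of(mx):
--         for c in cands:
--             if c < mx:
--                 return c
--         return 0
--
--     # pass 2: one (start, end) pair per max
--     pairs = [(start_of(mx), mx) for mx in maxs]
--     # pass 3: keep only the last pair of each run of equal starts
--     return [[s, e] for i, (s, e) in enumerate(pairs)
--             if i + 1 == len(pairs) or pairs[i + 1][0] != s]
-- ===== Notes on version B (the rewrite author's own statement) =====
-- stated objective: faster
-- what changed: B replaces A's stateful merge loop (last-marker, in-place replacement) with three staged passes: precompute the suffix strict-minima stack of mins once, map each max to a (start,end) pair against that stack, then filter to the last pair of each run of equal starts.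
import Mathlib
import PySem

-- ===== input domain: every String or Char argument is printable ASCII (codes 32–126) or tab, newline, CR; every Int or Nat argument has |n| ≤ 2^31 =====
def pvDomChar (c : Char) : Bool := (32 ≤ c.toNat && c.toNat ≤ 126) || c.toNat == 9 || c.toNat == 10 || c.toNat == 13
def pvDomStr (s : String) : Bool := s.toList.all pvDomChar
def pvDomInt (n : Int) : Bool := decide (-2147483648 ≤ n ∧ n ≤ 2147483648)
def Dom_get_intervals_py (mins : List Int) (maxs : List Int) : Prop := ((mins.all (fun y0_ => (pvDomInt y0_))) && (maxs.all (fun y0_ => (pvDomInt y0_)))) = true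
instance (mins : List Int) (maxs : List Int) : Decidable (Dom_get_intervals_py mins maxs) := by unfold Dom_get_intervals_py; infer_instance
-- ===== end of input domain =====

-- B replaces A's stateful merge loop by three staged passes (candidate stack,
-- map to pairs, lookahead filter); objective: faster by a constant-factor mechanism.

-- ===== PORT A =====
-- one iteration of A's outer loop (state = (last, result)); the inner loop over mins is the foldl
def pvStepA (mins : List Int) (st : Option Int × List (List Int)) (mx : Int) :
    Option Int × List (List Int) :=
  let start := mins.foldl (fun s mn => if mx > mn then mn else s) 0
  if st.1 == some start then
    (st.1, st.2.set (st.2.length - 1) [start, mx])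
  else
    (some start, st.2 ++ [[start, mx]])

def get_intervals_py (mins : List Int) (maxs : List Int) : List (List Int) :=
  (maxs.foldl (pvStepA mins) ((none : Option Int), ([] : List (List Int)))).2

-- ===== PORT B =====
-- Source B pass 1: keep m iff the stack is empty or m < its last element
def pvCandStep (acc : List Int) (m : Int) : List Int :=
  match acc.getLast? with
  | none => acc ++ [m]
  | some h => if m < h then acc ++ [m] else acc

-- Source B's start_of: first candidate below mx, else 0
def pvStartOf (cands : List Int) (mx : Int) : Int :=
  (cands.find? (fun c => decide (c < mx))).getD 0

-- Source B pass 3: keep a pair iff it is last, or the next pair has a different start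
def pvKeepLast : List (Int × Int) → List (List Int)
  | [] => []
  | [p] => [[p.1, p.2]]
  | p :: q :: rest =>
    if p.1 = q.1 then pvKeepLast (q :: rest)
    else [p.1, p.2] :: pvKeepLast (q :: rest)

def get_intervals_py_alt (mins : List Int) (maxs : List Int) : List (List Int) :=
  let cands := mins.reverse.foldl pvCandStep []
  pvKeepLast (maxs.map (fun mx => (pvStartOf cands mx, mx)))

-- ===== PRECONDITION & SPEC =====
def Spec_get_intervals_py (mins : List Int) (maxs : List Int) (out : List (List Int)) : Prop := out = get_intervals_py_alt mins maxs
instance (mins : List Int) (maxs : List Int) (out : List (List Int)) : Decidable (Spec_get_intervals_py mins maxs out) := by unfold Spec_get_intervals_py; infer_instance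

-- ===== CLAIM (what is proved, stated in full; the proofs are below) =====
def Claim_equal_get_intervals_py : Prop := ∀ (mins : List Int) (maxs : List Int), Dom_get_intervals_py mins maxs → Spec_get_intervals_py mins maxs (get_intervals_py mins maxs)

-- ===== LEMMAS AND PROOFS =====

-- A's inner loop returns the last element < mx, i.e. the first such in the reversed list
theorem pv_inner_find (mx : Int) : ∀ (l : List Int) (s : Int),
    l.foldl (fun s mn => if mx > mn then mn else s) s
      = (l.reverse.find? (fun mn => decide (mn < mx))).getD s := by
  intro l
  induction l with
  | nil => intro s; simp
  | cons m rest ih =>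
    intro s
    simp only [List.foldl_cons, List.reverse_cons, List.find?_append]
    rw [ih]
    cases h : rest.reverse.find? (fun mn => decide (mn < mx)) with
    | some c => simp
    | none =>
      simp only [Option.none_or]
      by_cases hm : m < mx
      · simp [List.find?, hm, gt_iff_lt]
      · simp [List.find?, hm, gt_iff_lt]

-- the stack keeps exactly the elements that can be a first (·< mx) match
theorem pv_cands_find : ∀ (l acc pref : List Int),
    (∀ x, x ∈ acc → x ∈ pref) →
    (∀ m : Int, acc.find? (fun c => decide (c < m)) = pref.find? (fun c => decide (c < m))) →
    ∀ (mx : Int),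
      (l.foldl pvCandStep acc).find? (fun c => decide (c < mx))
        = (pref ++ l).find? (fun c => decide (c < mx)) := by
  intro l
  induction l with
  | nil => intro acc pref hmem hfind mx; simpa using hfind mx
  | cons m rest ih =>
    intro acc pref hmem hfind mx
    have hstep : ∀ x, x ∈ pvCandStep acc m → x ∈ pref ++ [m] := by
      intro x hx
      unfold pvCandStep at hx
      cases hL : acc.getLast? with
      | none => rw [hL] at hx; simp at hx; simp; exact hx.imp (hmem x) id
      | some h =>
        rw [hL] at hx
        by_cases hlt : m < h
        · simp [hlt] at hx
          rcases hx with hx | hx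
          · exact List.mem_append_left _ (hmem x hx)
          · simp [hx]
        · simp [hlt] at hx
          exact List.mem_append_left _ (hmem x hx)
    have hstepf : ∀ m' : Int,
        (pvCandStep acc m).find? (fun c => decide (c < m'))
          = (pref ++ [m]).find? (fun c => decide (c < m')) := by
      intro m'
      unfold pvCandStep
      cases hL : acc.getLast? with
      | none =>
        have hacc : acc = [] := List.getLast?_eq_none_iff.mp hL
        subst hacc
        have : pref.find? (fun c => decide (c < m')) = none := (hfind m').symm
        simp [List.find?_append, this]
      | some h =>
        have hhacc : h ∈ acc := List.mem_of_getLast? hL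
        by_cases hlt : m < h
        · simp only [hlt, if_true]
          rw [List.find?_append, List.find?_append, hfind m']
        · simp only [hlt, if_false]
          rw [List.find?_append, ← hfind m']
          cases hf : acc.find? (fun c => decide (c < m')) with
          | some c => simp
          | none =>
            have hh : ¬ (h < m') := by
              have := List.find?_eq_none.mp hf h hhacc
              simpa using this
            have hmm : ¬ (m < m') := by omega
            simp [List.find?, hmm]
    have := ih (pvCandStep acc m) (pref ++ [m]) hstep hstepf mx
    simpa [List.append_assoc] using this

-- the two start computations agree
theorem pv_start_eq (mins : List Int) (mx : Int) :
    pvStartOf (mins.reverse.foldl pvCandStep []) mx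
      = mins.foldl (fun s mn => if mx > mn then mn else s) 0 := by
  unfold pvStartOf
  rw [pv_inner_find mx mins 0]
  have := pv_cands_find mins.reverse [] [] (by simp) (by simp) mx
  rw [this]
  simp

-- pvKeepLast with a pending run (s, e) in front
theorem pv_keepLast_cons_eq (s e e' : Int) (ps : List (Int × Int)) :
    pvKeepLast ((s, e) :: (s, e') :: ps) = pvKeepLast ((s, e') :: ps) := by
  simp [pvKeepLast]

theorem pv_keepLast_cons_ne (s e s' e' : Int) (ps : List (Int × Int)) (h : s ≠ s') :
    pvKeepLast ((s, e) :: (s', e') :: ps) = [s, e] :: pvKeepLast ((s', e') :: ps) := by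
  simp [pvKeepLast, h]

-- A's fold in the middle of a run (s, e) equals B's filter with that run pending
theorem pv_fold_run (mins : List Int) :
    ∀ (maxs : List Int) (s e : Int) (res : List (List Int)),
    (maxs.foldl (pvStepA mins) (some s, res ++ [[s, e]])).2
      = res ++ pvKeepLast ((s, e) ::
          maxs.map (fun mx => (mins.foldl (fun a mn => if mx > mn then mn else a) 0, mx))) := by
  intro maxs
  induction maxs with
  | nil => intro s e res; simp [pvKeepLast]
  | cons mx rest ih =>
    intro s e res
    simp only [List.foldl_cons, List.map_cons]
    set s' := mins.foldl (fun a mn => if mx > mn then mn else a) 0 with hs'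
    by_cases heq : s = s'
    · have hA : pvStepA mins (some s, res ++ [[s, e]]) mx
          = (some s, res ++ [[s, mx]]) := by
        simp [pvStepA, ← hs', heq]
      rw [hA, ← heq, pv_keepLast_cons_eq]
      exact ih s mx res
    · have hA : pvStepA mins (some s, res ++ [[s, e]]) mx
          = (some s', (res ++ [[s, e]]) ++ [[s', mx]]) := by
        simp [pvStepA, ← hs', heq]
      rw [hA, pv_keepLast_cons_ne s e s' mx _ heq, ih s' mx (res ++ [[s, e]])]
      simp
-- ===== VERDICT (by name: the statement is the Claim_ definition above) =====
theorem get_intervals_py_spec : Claim_equal_get_intervals_py := by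
  intro mins maxs _
  unfold Spec_get_intervals_py get_intervals_py get_intervals_py_alt
  cases maxs with
  | nil => simp [pvKeepLast]
  | cons mx rest =>
    simp only [List.foldl_cons, List.map_cons]
    have hA : pvStepA mins ((none : Option Int), ([] : List (List Int))) mx
        = (some (mins.foldl (fun a mn => if mx > mn then mn else a) 0),
           [[mins.foldl (fun a mn => if mx > mn then mn else a) 0, mx]]) := by
      simp [pvStepA]
    rw [hA]
    have := pv_fold_run mins rest (mins.foldl (fun a mn => if mx > mn then mn else a) 0) mx []
    simp only [List.nil_append] at this
    rw [this]
    congr 2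
    · rw [pv_start_eq]
    · exact List.map_congr_left fun m _ => by rw [pv_start_eq]
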